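-- pv_equiv track=rewrite | github.com/hammii/Algorithm | Programmers_python/프린터.py | solution
-- ===== SOURCE A (Python) =====
-- from collections import deque
--
-- def solution(priorities, location):
--     answer = 0
--     p_location = deque()
--
--     for idx in range(len(priorities)):
--         p_location.append([priorities[idx], idx])
--
--     while p_location:
--         cur = p_location.popleft()
--         if p_location and cur[0] < max(p_location)[0]:
--             p_location.append(cur)
--         else:
--             answer += 1
--             if cur[1] == location:
--                 break
--
--     return answer
-- ===== SOURCE B (Python) =====
-- def solution(priorities, location):
--     docs = list(enumerate(priorities))
--     printed = 0
--     while docs: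
--         top = max(p for _, p in docs)
--         m = next(k for k, d in enumerate(docs) if d[1] == top)
--         printed += 1
--         if docs[m][0] == location:
--             break
--         docs = docs[m + 1:] + docs[:m]
--     return printed
-- ===== Notes on version B (the rewrite author's own statement) =====
-- stated objective: faster
-- what changed: Instead of rotating the deque one element at a time and recomputing the maximum of the whole queue at every single rotation, B jumps directly to the first document of maximal priority with one scan and one slice per printed document.
import Mathlib
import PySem

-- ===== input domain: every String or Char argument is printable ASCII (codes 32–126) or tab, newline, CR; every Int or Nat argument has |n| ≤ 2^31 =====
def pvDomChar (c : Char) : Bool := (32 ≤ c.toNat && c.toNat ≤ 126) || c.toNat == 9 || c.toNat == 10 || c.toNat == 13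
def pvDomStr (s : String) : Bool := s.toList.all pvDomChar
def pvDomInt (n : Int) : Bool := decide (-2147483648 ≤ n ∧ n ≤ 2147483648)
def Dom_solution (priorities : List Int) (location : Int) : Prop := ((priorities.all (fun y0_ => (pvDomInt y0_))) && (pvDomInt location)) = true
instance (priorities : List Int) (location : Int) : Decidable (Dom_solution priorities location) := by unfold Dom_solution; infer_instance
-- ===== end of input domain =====

-- B replaces A's one-step deque rotation (with a full max() scan per rotation) by jumping
-- straight to the first maximal-priority document with one scan and one slice per printed
-- document; return values agree on all inputs (A is total).

-- ===== PORT A =====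
-- Python max() over the deque of [priority, idx] lists: fold keeping the first maximal
-- element under lexicographic >, exactly Python's "result = first; if y > result: result = y".
def pvPairGtB (y acc : Int × Int) : Bool := acc.1 < y.1 || (acc.1 == y.1 && acc.2 < y.2)

def pvMaxFrom (acc : Int × Int) : List (Int × Int) → Int × Int
  | [] => acc
  | y :: t => pvMaxFrom (if pvPairGtB y acc then y else acc) t

def pvPyMax : List (Int × Int) → Int × Int
  | [] => (0, 0)        -- unreachable: A only calls max on a nonempty deque
  | x :: t => pvMaxFrom x t

-- termination helpers for loopA (the loop re-appends elements; the measure is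
-- length² + index of the first maximal-priority element, which strictly decreases)
def pvMaxFst : List (Int × Int) → Int
  | [] => 0
  | x :: t => t.foldl (fun a y => max a y.1) x.1

def pvFirstFst (tp : Int) : List (Int × Int) → Nat
  | [] => 0
  | x :: r => if x.1 == tp then 0 else pvFirstFst tp r + 1

def pvMu (q : List (Int × Int)) : Nat := q.length * q.length + pvFirstFst (pvMaxFst q) q

theorem pvFirstFst_le (tp : Int) (l : List (Int × Int)) : pvFirstFst tp l ≤ l.length := by
  induction l with
  | nil => simp [pvFirstFst]
  | cons x r ih => simp only [pvFirstFst, List.length_cons]; split <;> omega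

theorem pvFirstFst_lt (tp : Int) (q : List (Int × Int)) (h : ∃ x ∈ q, x.1 = tp) :
    pvFirstFst tp q < q.length := by
  induction q with
  | nil => simp at h
  | cons x r ih =>
    simp only [pvFirstFst, List.length_cons]
    by_cases hx : (x.1 == tp) = true
    · simp [hx]
    · rw [if_neg hx]
      obtain ⟨y, hy, hyt⟩ := h
      rcases List.mem_cons.mp hy with hy | hy
      · exact absurd (by rw [hy] at hyt; simp [hyt]) hx
      · have := ih ⟨y, hy, hyt⟩; omega

theorem pvFirstFst_append (tp : Int) (l l' : List (Int × Int))
    (h : pvFirstFst tp l < l.length) : pvFirstFst tp (l ++ l') = pvFirstFst tp l := by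
  induction l with
  | nil => simp at h
  | cons x r ih =>
    simp only [pvFirstFst, List.cons_append, List.length_cons] at *
    by_cases hx : (x.1 == tp) = true
    · simp [hx]
    · rw [if_neg hx] at h ⊢
      rw [if_neg hx]
      have := ih (by omega)
      omega

theorem pvFoldlMaxFst (l : List (Int × Int)) : ∀ a b : Int,
    l.foldl (fun x y => max x y.1) (max a b) = max a (l.foldl (fun x y => max x y.1) b) := by
  induction l with
  | nil => intro a b; rfl
  | cons x t ih =>
    intro a b
    simp only [List.foldl_cons]
    rw [max_assoc, ih]

theorem pvMaxFrom_fst (l : List (Int × Int)) : ∀ acc : Int × Int,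
    (pvMaxFrom acc l).1 = l.foldl (fun a y => max a y.1) acc.1 := by
  induction l with
  | nil => intro acc; rfl
  | cons y t ih =>
    intro acc
    simp only [pvMaxFrom, List.foldl_cons]
    rw [ih]
    congr 1
    unfold pvPairGtB
    split <;> rename_i hgt
    · simp only [Bool.or_eq_true, Bool.and_eq_true, decide_eq_true_eq, beq_iff_eq] at hgt
      rcases hgt with h | ⟨h, _⟩ <;> omega
    · simp only [Bool.or_eq_true, Bool.and_eq_true, decide_eq_true_eq, beq_iff_eq, not_or,
        not_and] at hgt
      omega

theorem pvPyMax_fst (x : Int × Int) (t : List (Int × Int)) :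
    (pvPyMax (x :: t)).1 = pvMaxFst (x :: t) := by
  simp [pvPyMax, pvMaxFst, pvMaxFrom_fst]

theorem pvMaxFst_cons (cur x : Int × Int) (t : List (Int × Int)) :
    pvMaxFst (cur :: x :: t) = max cur.1 (pvMaxFst (x :: t)) := by
  simp only [pvMaxFst, List.foldl_cons]
  rw [pvFoldlMaxFst]

theorem pvMaxFst_append_singleton (x : Int × Int) (t : List (Int × Int)) (cur : Int × Int) :
    pvMaxFst ((x :: t) ++ [cur]) = max (pvMaxFst (x :: t)) cur.1 := by
  simp [pvMaxFst, List.foldl_append]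

theorem pvMaxFst_attained (q : List (Int × Int)) (h : q ≠ []) :
    ∃ x ∈ q, x.1 = pvMaxFst q := by
  induction q with
  | nil => exact absurd rfl h
  | cons x t ih =>
    cases t with
    | nil => exact ⟨x, by simp, rfl⟩
    | cons y s =>
      rw [pvMaxFst_cons]
      rcases max_cases x.1 (pvMaxFst (y :: s)) with ⟨hmx, _⟩ | ⟨hmx, _⟩
      · exact ⟨x, by simp, hmx.symm⟩
      · rcases ih (by simp) with ⟨z, hz, hzt⟩
        exact ⟨z, by simp [hz], by rw [hmx, hzt]⟩

theorem pvMu_rotate (cur : Int × Int) (x : Int × Int) (t : List (Int × Int))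
    (hlt : cur.1 < pvMaxFst (x :: t)) :
    pvMu ((x :: t) ++ [cur]) < pvMu (cur :: x :: t) := by
  have hM1 : pvMaxFst (cur :: x :: t) = pvMaxFst (x :: t) := by
    rw [pvMaxFst_cons, max_eq_right hlt.le]
  have hM2 : pvMaxFst ((x :: t) ++ [cur]) = pvMaxFst (x :: t) := by
    rw [pvMaxFst_append_singleton, max_eq_left hlt.le]
  have hatt := pvMaxFst_attained (x :: t) (by simp)
  have hfl := pvFirstFst_lt (pvMaxFst (x :: t)) (x :: t) hatt
  have hap := pvFirstFst_append (pvMaxFst (x :: t)) (x :: t) [cur] hfl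
  have hcons : pvFirstFst (pvMaxFst (x :: t)) (cur :: x :: t)
      = pvFirstFst (pvMaxFst (x :: t)) (x :: t) + 1 := by
    simp only [pvFirstFst]
    rw [if_neg (by simp; omega)]
  unfold pvMu
  rw [hM1, hM2, hap, hcons]
  simp only [List.length_append, List.length_cons, List.length_nil, Nat.zero_add]
  omega

theorem pvMu_tail (cur : Int × Int) (rest : List (Int × Int)) :
    pvMu rest < pvMu (cur :: rest) := by
  unfold pvMu
  have h1 := pvFirstFst_le (pvMaxFst rest) rest
  simp only [List.length_cons]
  nlinarith [h1]

def loopA : List (Int × Int) → Int → Int → Int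
  | [], _, answer => answer
  | cur :: rest, location, answer =>
    if h : rest ≠ [] ∧ cur.1 < (pvPyMax rest).1 then
      loopA (rest ++ [cur]) location answer
    else if cur.2 == location then answer + 1
    else loopA rest location (answer + 1)
termination_by q _ _ => pvMu q
decreasing_by
  · rcases h with ⟨hne, hlt⟩
    cases rest with
    | nil => exact absurd rfl hne
    | cons x t =>
      rw [pvPyMax_fst] at hlt
      exact pvMu_rotate cur x t hlt
  · exact pvMu_tail cur rest

def pvBuildA : List Int → Int → List (Int × Int)
  | [], _ => []
  | p :: t, i => (p, i) :: pvBuildA t (i + 1)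

def solution (priorities : List Int) (location : Int) : Int :=
  loopA (pvBuildA priorities 0) location 0

-- ===== PORT B =====
-- B works on enumerate(priorities): pairs (index, priority).
def pvMaxSnd : List (Int × Int) → Int
  | [] => 0           -- unreachable: only called on a nonempty list
  | x :: t => t.foldl (fun a y => max a y.2) x.2

def pvFindTop (tp : Int) : List (Int × Int) → Nat
  | [] => 0           -- unreachable: tp is attained
  | d :: t => if d.2 == tp then 0 else pvFindTop tp t + 1

def pvSw (x : Int × Int) : Int × Int := (x.2, x.1)

-- bridge to the fst-side helpers (used for loopB's termination and the proofs)
theorem pvMaxSnd_eq (q : List (Int × Int)) : pvMaxSnd q = pvMaxFst (q.map pvSw) := by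
  cases q with
  | nil => rfl
  | cons x t => simp [pvMaxSnd, pvMaxFst, pvSw, List.foldl_map]

theorem pvFindTop_eq (tp : Int) (q : List (Int × Int)) :
    pvFindTop tp q = pvFirstFst tp (q.map pvSw) := by
  induction q with
  | nil => rfl
  | cons d t ih => simp [pvFindTop, pvFirstFst, pvSw, ih]

theorem pvFindTop_lt (q : List (Int × Int)) (h : q ≠ []) :
    pvFindTop (pvMaxSnd q) q < q.length := by
  rw [pvFindTop_eq, pvMaxSnd_eq]
  have : q.length = (q.map pvSw).length := by simp
  rw [this]
  exact pvFirstFst_lt _ _ (pvMaxFst_attained _ (by simpa using h))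

def loopB : List (Int × Int) → Int → Int → Int
  | [], _, printed => printed
  | d :: ds, location, printed =>
    let docs := d :: ds
    let tp := pvMaxSnd docs
    let m := pvFindTop tp docs
    if (docs.getD m (0, 0)).1 == location then printed + 1
    else loopB (docs.drop (m + 1) ++ docs.take m) location (printed + 1)
termination_by docs _ _ => docs.length
decreasing_by
  have hm := pvFindTop_lt (d :: ds) (by simp)
  simp only [List.length_append, List.length_drop, List.length_take, List.length_cons] at *
  omega

def pvBuildB : List Int → Int → List (Int × Int)
  | [], _ => []
  | p :: t, i => (i, p) :: pvBuildB t (i + 1)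

def solution_alt (priorities : List Int) (location : Int) : Int :=
  loopB (pvBuildB priorities 0) location 0

-- ===== PRECONDITION & SPEC =====
def Spec_solution (priorities : List Int) (location : Int) (out : Int) : Prop := out = solution_alt priorities location
instance (priorities : List Int) (location : Int) (out : Int) : Decidable (Spec_solution priorities location out) := by unfold Spec_solution; infer_instance

-- ===== CLAIM (what is proved, stated in full; the proofs are below) =====
def Claim_equal_solution : Prop := ∀ (priorities : List Int) (location : Int), Dom_solution priorities location → Spec_solution priorities location (solution priorities location)

-- ===== LEMMAS AND PROOFS =====
theorem pvSw_sw (x : Int × Int) : pvSw (pvSw x) = x := rfl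

theorem pvMap_sw_sw (l : List (Int × Int)) : (l.map pvSw).map pvSw = l := by
  simp [List.map_map, Function.comp_def, pvSw_sw]

theorem pvGetD_map_sw (l : List (Int × Int)) (m : Nat) (h : m < l.length) :
    (l.map pvSw).getD m (0, 0) = pvSw (l.getD m (0, 0)) := by
  rw [List.getD_eq_getElem l _ h, List.getD_eq_getElem _ _ (by simpa using h)]
  simp

-- one B-step is invariant under A's rotation of a non-maximal front element
theorem pvMaxSnd_map (q : List (Int × Int)) : pvMaxSnd (q.map pvSw) = pvMaxFst q := by
  rw [pvMaxSnd_eq, pvMap_sw_sw]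

theorem pvFindTop_map (tp : Int) (q : List (Int × Int)) :
    pvFindTop tp (q.map pvSw) = pvFirstFst tp q := by
  rw [pvFindTop_eq, pvMap_sw_sw]

theorem loopB_rot (cur x : Int × Int) (t : List (Int × Int))
    (hlt : cur.1 < pvMaxFst (x :: t)) (loc k : Int) :
    loopB ((cur :: x :: t).map pvSw) loc k = loopB (((x :: t) ++ [cur]).map pvSw) loc k := by
  have hM1 : pvMaxFst (cur :: x :: t) = pvMaxFst (x :: t) := by
    rw [pvMaxFst_cons, max_eq_right hlt.le]
  have hM2 : pvMaxFst ((x :: t) ++ [cur]) = pvMaxFst (x :: t) := by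
    rw [pvMaxFst_append_singleton, max_eq_left hlt.le]
  have hm0lt : pvFirstFst (pvMaxFst (x :: t)) (x :: t) < (x :: t).length :=
    pvFirstFst_lt _ _ (pvMaxFst_attained _ (by simp))
  have hm1 : pvFirstFst (pvMaxFst (x :: t)) (cur :: x :: t)
      = pvFirstFst (pvMaxFst (x :: t)) (x :: t) + 1 := by
    simp only [pvFirstFst]
    rw [if_neg (by simp; omega)]
  have hm2 : pvFirstFst (pvMaxFst (x :: t)) ((x :: t) ++ [cur])
      = pvFirstFst (pvMaxFst (x :: t)) (x :: t) :=
    pvFirstFst_append _ _ _ hm0lt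
  have hg2 : (x :: (t ++ [cur])).getD (pvFirstFst (pvMaxFst (x :: t)) (x :: t)) (0, 0)
      = (x :: t).getD (pvFirstFst (pvMaxFst (x :: t)) (x :: t)) (0, 0) :=
    List.getD_append _ _ _ _ hm0lt
  have hlist : List.drop (pvFirstFst (pvMaxFst (x :: t)) (x :: t) + 1 + 1) (cur :: x :: t)
        ++ List.take (pvFirstFst (pvMaxFst (x :: t)) (x :: t) + 1) (cur :: x :: t)
      = List.drop (pvFirstFst (pvMaxFst (x :: t)) (x :: t) + 1) (x :: (t ++ [cur]))
        ++ List.take (pvFirstFst (pvMaxFst (x :: t)) (x :: t)) (x :: (t ++ [cur])) := by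
    rw [show x :: (t ++ [cur]) = (x :: t) ++ [cur] from rfl,
      List.drop_append_of_le_length (by simp only [List.length_cons] at hm0lt ⊢; omega),
      List.take_append_of_le_length (by simp only [List.length_cons] at hm0lt ⊢; omega),
      List.drop_succ_cons, List.take_succ_cons]
    simp
  simp only [List.cons_append, List.map_cons] at hM2 hm2 ⊢
  rw [loopB.eq_def, loopB.eq_def]
  dsimp only
  rw [show pvSw cur :: pvSw x :: List.map pvSw t = List.map pvSw (cur :: x :: t) from by simp,
    show pvSw x :: List.map pvSw (t ++ [cur]) = List.map pvSw (x :: (t ++ [cur])) from by simp,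
    pvMaxSnd_map, pvMaxSnd_map, pvFindTop_map, pvFindTop_map, hM1, hM2, hm1, hm2,
    pvGetD_map_sw _ _ (by simp only [List.length_cons] at hm0lt ⊢; omega),
    pvGetD_map_sw _ _ (by simp only [List.length_cons, List.length_append] at hm0lt ⊢; omega),
    List.getD_cons_succ, hg2]
  congr 1
  simp only [← List.map_drop, ← List.map_take, ← List.map_append]
  rw [hlist]

-- main invariant: A's loop equals B's loop on the swapped queue
theorem loopA_eq (n : Nat) : ∀ (q : List (Int × Int)) (loc ans : Int), pvMu q ≤ n →
    loopA q loc ans = loopB (q.map pvSw) loc ans := by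
  induction n with
  | zero =>
    intro q loc ans h
    cases q with
    | nil => rw [loopA.eq_def, List.map_nil, loopB.eq_def]
    | cons cur rest =>
      exfalso
      simp only [pvMu, List.length_cons] at h
      nlinarith [h]
  | succ n ih =>
    intro q loc ans h
    cases q with
    | nil => rw [loopA.eq_def, List.map_nil, loopB.eq_def]
    | cons cur rest =>
      cases rest with
      | nil =>
        rw [loopA.eq_def]
        dsimp only
        rw [dif_neg (by simp)]
        simp only [List.map_cons, List.map_nil]
        rw [loopB.eq_def]
        dsimp only
        rw [loopA.eq_def]
        simp [pvMaxSnd, pvFindTop, pvSw]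
        intro _
        rw [loopB.eq_def]
      | cons rx rt =>
        by_cases hlt : cur.1 < pvMaxFst (rx :: rt)
        · rw [loopA.eq_def]
          dsimp only
          rw [dif_pos ⟨by simp, by rw [pvPyMax_fst]; exact hlt⟩]
          have hmu : pvMu ((rx :: rt) ++ [cur]) ≤ n := by
            have := pvMu_rotate cur rx rt hlt; omega
          rw [ih _ loc ans hmu]
          exact (loopB_rot cur rx rt hlt loc ans).symm
        · rw [loopA.eq_def]
          dsimp only
          rw [dif_neg (by rintro ⟨-, h2⟩; rw [pvPyMax_fst] at h2; exact hlt h2)]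
          have htp : pvMaxSnd (List.map pvSw (cur :: rx :: rt)) = cur.1 := by
            rw [pvMaxSnd_map, pvMaxFst_cons, max_eq_left (not_lt.mp hlt)]
          have hm : pvFindTop cur.1 (List.map pvSw (cur :: rx :: rt)) = 0 := by
            rw [pvFindTop_map]
            simp [pvFirstFst]
          have htail : pvMu (rx :: rt) ≤ n := by
            have := pvMu_tail cur (rx :: rt); omega
          simp only [List.map_cons]
          rw [loopB.eq_def]
          dsimp only
          rw [show pvSw cur :: pvSw rx :: List.map pvSw rt
              = List.map pvSw (cur :: rx :: rt) from by simp, htp, hm]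
          simp only [List.getD_cons_zero, List.drop_succ_cons, List.drop_zero, List.take_zero,
            List.append_nil, List.map_cons]
          rw [show (pvSw cur).1 = cur.2 from rfl,
            show pvSw rx :: List.map pvSw rt = List.map pvSw (rx :: rt) from rfl,
            ← ih (rx :: rt) loc (ans + 1) htail]

theorem pvBuild_eq (l : List Int) : ∀ i : Int, pvBuildB l i = (pvBuildA l i).map pvSw := by
  induction l with
  | nil => intro i; rfl
  | cons p t ih => intro i; simp [pvBuildA, pvBuildB, pvSw, ih]

-- ===== VERDICT (by name: the statement is the Claim_ definition above) =====
theorem solution_spec : Claim_equal_solution := by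
  intro priorities location _
  unfold Spec_solution solution solution_alt
  rw [pvBuild_eq]
  exact loopA_eq (pvMu (pvBuildA priorities 0)) _ _ _ le_rfl
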